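-- pv_equiv track=rewrite | github.com/andfilipe1/GetInventoryAWSMultiAccount | subnets.py | set_subnet_route_table
-- ===== SOURCE A (Python) =====
-- def set_subnet_route_table(route_tables_subnets_associations, region, subnet_id):
--     for route_table_subnet_association in route_tables_subnets_associations:
--         if 'SubnetId' in route_table_subnet_association:
--             if route_table_subnet_association['SubnetId'] == subnet_id:
--                 return route_table_subnet_association['RouteTableId']
--
--     for route_table_subnet_association in route_tables_subnets_associations:
--         if 'Region' in route_table_subnet_association:
--             if route_table_subnet_association['Region'] == region:
--                 return route_table_subnet_association['RouteTableId']
--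
--     return '-'
-- ===== SOURCE B (Python) =====
-- def set_subnet_route_table(route_tables_subnets_associations, region, subnet_id):
--     region_candidate = None
--     for assoc in route_tables_subnets_associations:
--         if assoc.get('SubnetId') == subnet_id:
--             return assoc['RouteTableId']
--         if region_candidate is None and assoc.get('Region') == region:
--             region_candidate = assoc
--     if region_candidate is not None:
--         return region_candidate['RouteTableId']
--     return '-'
-- ===== Notes on version B (the rewrite author's own statement) =====
-- stated objective: alternative
-- what changed: Replaces A's two sequential scans by one single pass that returns immediately on a SubnetId match and stashes the first Region-matching association as a deferred candidate used after the loop.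
import Mathlib
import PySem

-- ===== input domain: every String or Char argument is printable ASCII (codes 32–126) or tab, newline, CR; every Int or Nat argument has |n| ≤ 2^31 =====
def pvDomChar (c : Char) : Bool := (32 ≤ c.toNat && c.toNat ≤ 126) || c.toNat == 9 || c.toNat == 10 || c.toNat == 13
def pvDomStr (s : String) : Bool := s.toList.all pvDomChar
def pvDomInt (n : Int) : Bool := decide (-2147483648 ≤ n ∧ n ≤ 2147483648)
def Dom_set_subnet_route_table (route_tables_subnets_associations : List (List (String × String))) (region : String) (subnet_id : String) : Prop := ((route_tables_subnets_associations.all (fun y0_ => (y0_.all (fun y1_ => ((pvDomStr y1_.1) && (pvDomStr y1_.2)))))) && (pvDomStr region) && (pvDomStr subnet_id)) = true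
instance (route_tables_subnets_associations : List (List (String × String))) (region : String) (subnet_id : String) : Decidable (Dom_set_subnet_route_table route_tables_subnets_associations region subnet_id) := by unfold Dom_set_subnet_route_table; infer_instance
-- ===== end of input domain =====

-- B replaces A's two sequential scans by one single pass with a deferred first-Region-match candidate (alternative decomposition, same cost).

-- first-match lookup in an association list (Python dict lookup)
def pvLook (d : List (String × String)) (k : String) : Option String :=
  (d.find? (fun p => p.1 == k)).map (·.2)

-- ===== PORT A =====
-- first Python loop: return RouteTableId of the first association whose 'SubnetId' equals subnet_id
def pvA_bySubnet : List (List (String × String)) → String → Option String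
  | [], _ => none
  | d :: rest, sid =>
    match pvLook d "SubnetId" with
    | some v => if v = sid then some ((pvLook d "RouteTableId").getD "-") else pvA_bySubnet rest sid
    | none => pvA_bySubnet rest sid

-- second Python loop: return RouteTableId of the first association whose 'Region' equals region
def pvA_byRegion : List (List (String × String)) → String → Option String
  | [], _ => none
  | d :: rest, reg =>
    match pvLook d "Region" with
    | some v => if v = reg then some ((pvLook d "RouteTableId").getD "-") else pvA_byRegion rest reg
    | none => pvA_byRegion rest reg

def set_subnet_route_table (route_tables_subnets_associations : List (List (String × String))) (region : String) (subnet_id : String) : String :=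
  match pvA_bySubnet route_tables_subnets_associations subnet_id with
  | some r => r
  | none =>
    match pvA_byRegion route_tables_subnets_associations region with
    | some r => r
    | none => "-"

-- ===== PORT B =====
-- single pass: immediate return on SubnetId match, stash first Region-matching association, use it after the loop
def pvB_loop : List (List (String × String)) → String → String → Option (List (String × String)) → String
  | [], _, _, cand =>
    match cand with
    | some d => (pvLook d "RouteTableId").getD "-"
    | none => "-"
  | d :: rest, reg, sid, cand =>
    if pvLook d "SubnetId" = some sid then (pvLook d "RouteTableId").getD "-"
    else if cand = none ∧ pvLook d "Region" = some reg then pvB_loop rest reg sid (some d)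
    else pvB_loop rest reg sid cand

def set_subnet_route_table_alt (route_tables_subnets_associations : List (List (String × String))) (region : String) (subnet_id : String) : String :=
  pvB_loop route_tables_subnets_associations region subnet_id none

-- ===== PRECONDITION & SPEC =====
-- Pre_ excludes exactly the inputs where Python A raises KeyError: the association A reads
-- 'RouteTableId' from (first SubnetId match, else first Region match) lacks that key.
def pvPreB (route_tables_subnets_associations : List (List (String × String))) (region : String) (subnet_id : String) : Bool :=
  match route_tables_subnets_associations.find? (fun d => pvLook d "SubnetId" == some subnet_id) with
  | some d => (pvLook d "RouteTableId").isSome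
  | none =>
    match route_tables_subnets_associations.find? (fun d => pvLook d "Region" == some region) with
    | some d => (pvLook d "RouteTableId").isSome
    | none => true

def Pre_set_subnet_route_table (route_tables_subnets_associations : List (List (String × String))) (region : String) (subnet_id : String) : Prop :=
  pvPreB route_tables_subnets_associations region subnet_id = true

instance (route_tables_subnets_associations : List (List (String × String))) (region : String) (subnet_id : String) : Decidable (Pre_set_subnet_route_table route_tables_subnets_associations region subnet_id) := by
  unfold Pre_set_subnet_route_table; infer_instance

def pvWitness_set_subnet_route_table : (List (List (String × String))) × String × String :=
  ([[("SubnetId", "s1"), ("RouteTableId", "rtb-1")], [("Region", "us-east-1"), ("RouteTableId", "rtb-2")]], "us-east-1", "s1")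

def Spec_set_subnet_route_table (route_tables_subnets_associations : List (List (String × String))) (region : String) (subnet_id : String) (out : String) : Prop := out = set_subnet_route_table_alt route_tables_subnets_associations region subnet_id
instance (route_tables_subnets_associations : List (List (String × String))) (region : String) (subnet_id : String) (out : String) : Decidable (Spec_set_subnet_route_table route_tables_subnets_associations region subnet_id out) := by unfold Spec_set_subnet_route_table; infer_instance

-- ===== CLAIM (what is proved, stated in full; the proofs are below) =====
def Claim_equal_set_subnet_route_table : Prop := ∀ (route_tables_subnets_associations : List (List (String × String))) (region : String) (subnet_id : String), Dom_set_subnet_route_table route_tables_subnets_associations region subnet_id → Pre_set_subnet_route_table route_tables_subnets_associations region subnet_id → Spec_set_subnet_route_table route_tables_subnets_associations region subnet_id (set_subnet_route_table route_tables_subnets_associations region subnet_id)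

-- ===== LEMMAS AND PROOFS =====

theorem pvB_loop_eq (reg sid : String) :
    ∀ l : List (List (String × String)),
      (∀ d, pvB_loop l reg sid (some d) = ((pvA_bySubnet l sid).getD ((pvLook d "RouteTableId").getD "-"))) ∧
      pvB_loop l reg sid none = ((pvA_bySubnet l sid).getD ((pvA_byRegion l reg).map id |>.getD "-")) := by
  intro l
  induction l with
  | nil => simp [pvB_loop, pvA_bySubnet, pvA_byRegion]
  | cons d rest ih =>
    constructor
    · intro c
      by_cases hs : pvLook d "SubnetId" = some sid
      · simp [pvB_loop, pvA_bySubnet, hs]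
      · have h1 : pvB_loop (d :: rest) reg sid (some c) = pvB_loop rest reg sid (some c) := by
          simp [pvB_loop, hs]
        rw [h1, ih.1]
        cases hv : pvLook d "SubnetId" with
        | none => simp [pvA_bySubnet, hv]
        | some v =>
          have hvs : v ≠ sid := by intro h; exact hs (by rw [hv, h])
          simp [pvA_bySubnet, hv, hvs]
    · by_cases hs : pvLook d "SubnetId" = some sid
      · simp [pvB_loop, pvA_bySubnet, hs]
      · by_cases hr : pvLook d "Region" = some reg
        · have h1 : pvB_loop (d :: rest) reg sid none = pvB_loop rest reg sid (some d) := by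
            simp [pvB_loop, hs, hr]
          rw [h1, ih.1]
          cases hv : pvLook d "SubnetId" with
          | none => simp [pvA_bySubnet, pvA_byRegion, hv, hr]
          | some v =>
            have hvs : v ≠ sid := by intro h; exact hs (by rw [hv, h])
            simp [pvA_bySubnet, pvA_byRegion, hv, hvs, hr]
        · have h1 : pvB_loop (d :: rest) reg sid none = pvB_loop rest reg sid none := by
            simp [pvB_loop, hs, hr]
          rw [h1, ih.2]
          cases hv : pvLook d "SubnetId" with
          | none =>
            cases hw : pvLook d "Region" with
            | none => simp [pvA_bySubnet, pvA_byRegion, hv, hw]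
            | some w =>
              have hwr : w ≠ reg := by intro h; exact hr (by rw [hw, h])
              simp [pvA_bySubnet, pvA_byRegion, hv, hw, hwr]
          | some v =>
            have hvs : v ≠ sid := by intro h; exact hs (by rw [hv, h])
            cases hw : pvLook d "Region" with
            | none => simp [pvA_bySubnet, pvA_byRegion, hv, hvs, hw]
            | some w =>
              have hwr : w ≠ reg := by intro h; exact hr (by rw [hw, h])
              simp [pvA_bySubnet, pvA_byRegion, hv, hvs, hw, hwr]

-- ===== VERDICT (by name: the statement is the Claim_ definition above) =====
theorem set_subnet_route_table_spec : Claim_equal_set_subnet_route_table := by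
  intro l reg sid _ _
  unfold Spec_set_subnet_route_table set_subnet_route_table set_subnet_route_table_alt
  rw [(pvB_loop_eq reg sid l).2]
  cases hA : pvA_bySubnet l sid with
  | some r => simp
  | none => cases hB : pvA_byRegion l reg <;> simp
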